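-- pv_equiv track=rewrite | github.com/mough/Python-Challenge | Check io/matrices.py | colling
-- ===== SOURCE A (Python) =====
-- from collections import defaultdict
--
-- def colling(matrix):
--
--     find_cols = []
--     for i in range(len(matrix[0])):
--         find_cols.append([row[i] for row in matrix])
--
--     columns = {}
--     for i, row in enumerate(find_cols):
--         columns[i] = sum(row)
--
--     dcols = defaultdict(set)
--
--     for k, v in columns.items():
--         dcols[v].add(k)
--     ddcols = {k: v for k, v in dcols.items() if len(v) > 1}
--
--     if min(columns.values()) in ddcols:
--         smallest = min(ddcols.keys())
--         return min(ddcols.get(smallest))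
--     else:
--         smallest = min(columns.values())
--         return dcols.get(smallest).pop()
-- ===== SOURCE B (Python) =====
-- def colling(matrix):
--     sums = [sum(row[i] for row in matrix) for i in range(len(matrix[0]))]
--     return sums.index(min(sums))
-- ===== Notes on version B (the rewrite author's own statement) =====
-- stated objective: simpler
-- what changed: B replaces A's transpose-then-dict-of-sums, defaultdict(set) grouping, duplicate-filtering and two-branch selection by a single list of column sums followed by sums.index(min(sums)): both branches of A collapse to 'smallest column index attaining the minimal column sum'.
import Mathlib
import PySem

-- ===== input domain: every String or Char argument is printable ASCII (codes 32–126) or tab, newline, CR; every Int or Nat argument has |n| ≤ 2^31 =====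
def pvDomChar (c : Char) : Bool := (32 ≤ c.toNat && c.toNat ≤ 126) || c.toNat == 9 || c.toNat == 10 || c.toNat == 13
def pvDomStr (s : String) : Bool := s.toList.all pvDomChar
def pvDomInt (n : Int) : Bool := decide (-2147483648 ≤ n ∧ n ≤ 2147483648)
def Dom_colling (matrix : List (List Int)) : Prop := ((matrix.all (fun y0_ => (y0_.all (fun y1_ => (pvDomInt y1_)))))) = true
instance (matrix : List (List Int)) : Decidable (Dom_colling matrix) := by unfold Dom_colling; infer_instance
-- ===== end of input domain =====

-- B replaces A's transpose/dict-of-sums/defaultdict-grouping/two-branch selection by one list of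
-- column sums and sums.index(min(sums)); simpler, same result (smallest column index of minimal sum).

-- ===== PORT A =====
-- Literal transliteration of A.  Set.pop() in A's else-branch is reached (under Pre_) only on a
-- singleton set, where it deterministically yields the unique element; ported as headD.
def colling (matrix : List (List Int)) : Int :=
  let find_cols : List (List Int) :=
    (PySem.List.pyRange 0 ((PySem.List.pyGetD matrix 0 []).length : Int)).foldl
      (fun acc i => acc ++ [matrix.map (fun row => PySem.List.pyGetD row i 0)]) []
  let columns : PySem.Dict Int Int :=
    (PySem.List.enumerate find_cols 0).foldl (fun d p => d.insert p.1 p.2.sum) PySem.Dict.empty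
  let dcols : PySem.Dict Int (PySem.Set Int) :=
    columns.items.foldl
      (fun d p => d.modify p.2 PySem.Set.empty (fun t => PySem.Set.add t p.1)) PySem.Dict.empty
  let ddcols : PySem.Dict Int (PySem.Set Int) :=
    PySem.Dict.mk (dcols.items.filter (fun p => 1 < PySem.Set.len p.2))
  let mval : Int := (PySem.List.min? columns.values (fun x => x)).getD 0
  if ddcols.contains mval then
    let smallest := (PySem.List.min? ddcols.keys (fun x => x)).getD 0
    (PySem.List.min? (ddcols.getD smallest PySem.Set.empty) (fun x => x)).getD 0
  else
    (dcols.getD mval PySem.Set.empty).headD 0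

-- ===== PORT B =====
def colling_alt (matrix : List (List Int)) : Int :=
  let sums : List Int :=
    (PySem.List.pyRange 0 ((PySem.List.pyGetD matrix 0 []).length : Int)).map
      (fun i => (matrix.map (fun row => PySem.List.pyGetD row i 0)).sum)
  ((PySem.List.index? sums ((PySem.List.min? sums (fun x => x)).getD 0)).getD 0 : Nat)

-- ===== PRECONDITION & SPEC =====
-- A raises on: empty matrix (matrix[0] IndexError), empty first row (min() of an empty sequence,
-- ValueError), and any row shorter than the first (row[i] IndexError).  Pre_ excludes exactly these.
def Pre_colling (matrix : List (List Int)) : Prop :=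
  matrix ≠ [] ∧ PySem.List.pyGetD matrix 0 [] ≠ [] ∧
    ∀ row ∈ matrix, (PySem.List.pyGetD matrix 0 []).length ≤ row.length
instance (matrix : List (List Int)) : Decidable (Pre_colling matrix) := by
  unfold Pre_colling; infer_instance
def pvWitness_colling : List (List Int) := [[1, 2], [3, 0]]

def Spec_colling (matrix : List (List Int)) (out : Int) : Prop := out = colling_alt matrix
instance (matrix : List (List Int)) (out : Int) : Decidable (Spec_colling matrix out) := by
  unfold Spec_colling; infer_instance

-- ===== CLAIM (what is proved, stated in full; the proofs are below) =====
def Claim_equal_colling : Prop :=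
  ∀ (matrix : List (List Int)), Dom_colling matrix → Pre_colling matrix →
    Spec_colling matrix (colling matrix)

-- ===== LEMMAS AND PROOFS =====

-- (enumerate xs s).map (fun p => (p.1, f p.2)) = enumerate (xs.map f) s
theorem pv_enumerate_map {α β : Type} (f : α → β) (xs : List α) (s : Int) :
    (PySem.List.enumerate xs s).map (fun p => (p.1, f p.2))
      = PySem.List.enumerate (xs.map f) s := by
  induction xs generalizing s with
  | nil => simp [PySem.List.enumerate_nil]
  | cons x t ih => simp [PySem.List.enumerate_cons, ih]

-- the defaultdict(set)-grouping loop: the set stored at v collects, in ascending order, the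
-- first components of the processed pairs whose second component is v
theorem pv_grp_getD (s : List Int) (start : Int) (d : PySem.Dict Int (PySem.Set Int))
    (hd : ∀ v j, j ∈ PySem.Dict.getD d v PySem.Set.empty → j < start) (v : Int) :
    PySem.Dict.getD
      ((PySem.List.enumerate s start).foldl
        (fun d p => d.modify p.2 PySem.Set.empty (fun t => PySem.Set.add t p.1)) d)
      v PySem.Set.empty
    = PySem.Dict.getD d v PySem.Set.empty
        ++ ((PySem.List.enumerate s start).filter (fun p => p.2 == v)).map (fun p => p.1) := by
  induction s generalizing start d with
  | nil => simp [PySem.List.enumerate_nil]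
  | cons x t ih =>
    rw [PySem.List.enumerate_cons]
    simp only [List.foldl_cons, List.filter_cons]
    have hnotmem : start ∉ PySem.Dict.getD d x PySem.Set.empty := fun hmem => by
      have := hd x start hmem; omega
    have hadd : PySem.Set.add (PySem.Dict.getD d x PySem.Set.empty) start
        = PySem.Dict.getD d x PySem.Set.empty ++ [start] := by
      unfold PySem.Set.add
      rw [if_neg (by rw [PySem.Set.contains_iff]; exact hnotmem)]
    have hd' : ∀ w j,
        j ∈ PySem.Dict.getD (d.modify x PySem.Set.empty (fun t => PySem.Set.add t start))
              w PySem.Set.empty → j < start + 1 := by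
      intro w j hj
      rw [PySem.Dict.getD_modify] at hj
      by_cases hw : w = x
      · rw [if_pos hw, PySem.Set.mem_add] at hj
        rcases hj with h | h
        · have := hd x j h; omega
        · omega
      · rw [if_neg hw] at hj; have := hd w j hj; omega
    rw [ih (start + 1) _ hd', PySem.Dict.getD_modify]
    by_cases hv : v = x
    · subst hv
      rw [if_pos rfl, hadd]
      simp [List.append_assoc]
    · rw [if_neg hv]
      have : (x == v) = false := by simp [beq_eq_false_iff_ne]; exact fun h => hv h.symm
      simp [this]

-- structure of the ascending index list of a value v in s
theorem pv_filter_enum_struct (s : List Int) (v : Int) (start : Int) (hv : v ∈ s) :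
    ∃ t, ((PySem.List.enumerate s start).filter (fun p => p.2 == v)).map (fun p => p.1)
          = (start + (s.idxOf v : Int)) :: t
        ∧ ∀ j ∈ t, start + (s.idxOf v : Int) ≤ j := by
  induction s generalizing start with
  | nil => cases hv
  | cons x t ih =>
    rw [PySem.List.enumerate_cons]
    by_cases hx : x = v
    · subst hx
      refine ⟨((PySem.List.enumerate t (start + 1)).filter (fun p => p.2 == x)).map
        (fun p => p.1), ?_, ?_⟩
      · simp [List.idxOf_cons_self]
      · intro j hj
        simp only [List.mem_map, List.mem_filter] at hj
        obtain ⟨p, hp, rfl⟩ := hj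
        rw [PySem.List.mem_enumerate_iff] at hp
        obtain ⟨k, hk, rfl⟩ := hp.1
        simp only [List.idxOf_cons_self]
        push_cast
        omega
    · have hvt : v ∈ t := by cases hv with
        | head => exact absurd rfl hx
        | tail _ h => exact h
      obtain ⟨u, hu, hall⟩ := ih (start + 1) hvt
      have hxv : (x == v) = false := by simp [hx]
      have hidx : (((x :: t).idxOf v : Nat) : Int) = (t.idxOf v : Int) + 1 := by
        rw [List.idxOf_cons_ne _ (fun h => hx h)]; push_cast; ring
      refine ⟨u, ?_, ?_⟩
      · simp only [List.filter_cons, hxv, Bool.false_eq_true, if_false]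
        rw [hu, hidx]
        congr 1
        ring
      · intro j hj; have := hall j hj; rw [hidx]; omega

-- foldl min keeps x when x is a lower bound of the list
theorem pv_foldl_min_eq (t : List Int) (x : Int) (h : ∀ j ∈ t, x ≤ j) :
    t.foldl min x = x := by
  induction t generalizing x with
  | nil => rfl
  | cons y u ih =>
    simp only [List.foldl_cons]
    rw [min_eq_left (h y (by simp))]
    exact ih x (fun j hj => h j (by simp [hj]))

-- min? of a nonempty list equals a member that is a lower bound
theorem pv_min?_eq_of_bound (l : List Int) (m : Int) (hm : m ∈ l)
    (hb : ∀ y ∈ l, m ≤ y) : PySem.List.min? l (fun x => x) = some m := by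
  cases hmin : PySem.List.min? l (fun x => x) with
  | none => rw [PySem.List.min?_eq_none_iff] at hmin; subst hmin; cases hm
  | some w =>
    have hw := PySem.List.min?_mem hmin
    have h1 : w ≤ m := PySem.List.min?_isMin hmin m hm
    have h2 : m ≤ w := hb w hw
    rw [le_antisymm h1 h2]

theorem colling_eq_alt (matrix : List (List Int)) (hpre : Pre_colling matrix) :
    colling matrix = colling_alt matrix := by
  obtain ⟨-, h0, -⟩ := hpre
  unfold colling colling_alt
  simp only [PySem.List.foldl_append_singleton_eq_map, List.nil_append]
  set n := (PySem.List.pyGetD matrix 0 []).length with hn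
  set col : Int → List Int := fun i => matrix.map (fun row => PySem.List.pyGetD row i 0) with hcol
  -- the two sums lists coincide
  set sums : List Int := (PySem.List.pyRange 0 (n : Int)).map (fun i => (col i).sum) with hsums
  have hfc : ((PySem.List.pyRange 0 (n : Int)).map col).map List.sum = sums := by
    simp [hsums, List.map_map]
  -- sums is nonempty
  have hne : sums ≠ [] := by
    have : 0 < n := List.length_pos_iff.mpr h0
    simp [hsums, PySem.List.pyRange_zero_natCast, List.map_eq_nil_iff, List.range_eq_nil]
    omega
  -- columns.items = enumerate sums 0
  have hfresh : ∀ a ∈ PySem.List.enumerate ((PySem.List.pyRange 0 (n : Int)).map col) 0,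
      (PySem.Dict.empty : PySem.Dict Int Int).contains a.1 = false := by
    intro a _; exact PySem.Dict.contains_empty a.1
  have hnodupfst : ((PySem.List.enumerate ((PySem.List.pyRange 0 (n : Int)).map col) 0).map
      (fun p => p.1)).Nodup := by
    rw [PySem.List.map_fst_enumerate]
    rw [show ((0 : Int) + ↑(((PySem.List.pyRange 0 (n : Int)).map col).length))
        = (((PySem.List.pyRange 0 (n : Int)).map col).length : Int) by ring]
    rw [PySem.List.pyRange_zero_natCast]
    exact List.Nodup.map (fun a b => by omega) (List.nodup_range)
  have hitems : (((PySem.List.enumerate ((PySem.List.pyRange 0 (n : Int)).map col) 0).foldl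
      (fun d p => d.insert p.1 p.2.sum) PySem.Dict.empty)).items
      = PySem.List.enumerate sums 0 := by
    rw [show (fun (d : PySem.Dict Int Int) (p : Int × List Int) => d.insert p.1 p.2.sum)
        = (fun d p => d.insert ((fun q : Int × List Int => q.1) p)
            ((fun q : Int × List Int => q.2.sum) p)) from rfl]
    rw [PySem.Dict.items_foldl_insert_fresh _ _ _ _ hfresh hnodupfst]
    rw [show (fun (a : Int × List Int) => (a.1, a.2.sum)) =
        (fun (a : Int × List Int) => (a.1, List.sum a.2)) from rfl]
    rw [pv_enumerate_map List.sum, hfc]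
    rfl
  set columns : PySem.Dict Int Int := ((PySem.List.enumerate
      ((PySem.List.pyRange 0 (n : Int)).map col) 0).foldl
      (fun d p => d.insert p.1 p.2.sum) PySem.Dict.empty) with hcolumns
  have hvalues : columns.values = sums := by
    show columns.items.map (fun p => p.2) = sums
    rw [hitems, PySem.List.map_snd_enumerate]
  -- the minimum
  have hm : ∃ m, PySem.List.min? sums (fun x => x) = some m := by
    cases hmin : PySem.List.min? sums (fun x => x) with
    | none => rw [PySem.List.min?_eq_none_iff] at hmin; exact absurd hmin hne
    | some w => exact ⟨w, rfl⟩
  obtain ⟨m, hm⟩ := hm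
  have hmmem : m ∈ sums := PySem.List.min?_mem hm
  have hmmin : ∀ y ∈ sums, m ≤ y := fun y hy => PySem.List.min?_isMin hm y hy
  -- dcols
  set dcols : PySem.Dict Int (PySem.Set Int) := columns.items.foldl
      (fun d p => d.modify p.2 PySem.Set.empty (fun t => PySem.Set.add t p.1))
      PySem.Dict.empty with hdcols
  have hgetD : ∀ v, PySem.Dict.getD dcols v PySem.Set.empty
      = ((PySem.List.enumerate sums 0).filter (fun p => p.2 == v)).map (fun p => p.1) := by
    intro v
    rw [hdcols, hitems, pv_grp_getD sums 0 PySem.Dict.empty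
      (by intro w j hj; simp [PySem.Dict.getD_empty] at hj) v]
    simp [PySem.Dict.getD_empty]
  have hkeys : ∀ k, k ∈ dcols.keys → k ∈ sums := by
    intro k hk
    rw [hdcols, hitems] at hk
    rw [show (fun (d : PySem.Dict Int (PySem.Set Int)) (p : Int × Int) =>
        d.modify p.2 PySem.Set.empty (fun t => PySem.Set.add t p.1))
      = (fun d p => d.modify ((fun q : Int × Int => q.2) p) PySem.Set.empty
          ((fun (d : PySem.Dict Int (PySem.Set Int)) (q : Int × Int)
            (t : PySem.Set Int) => PySem.Set.add t q.1) d p)) from rfl] at hk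
    rw [PySem.Dict.keys_foldl_modify_key] at hk
    rw [PySem.Dict.keys_empty, PySem.Set.update_nil_left, PySem.Set.mem_ofList,
      PySem.List.map_snd_enumerate] at hk
    exact hk
  have hnodupkeys : dcols.keys.Nodup := by
    rw [hdcols]
    rw [show (fun (d : PySem.Dict Int (PySem.Set Int)) (p : Int × Int) =>
        d.modify p.2 PySem.Set.empty (fun t => PySem.Set.add t p.1))
      = (fun d p => d.modify ((fun q : Int × Int => q.2) p) PySem.Set.empty
          ((fun (d : PySem.Dict Int (PySem.Set Int)) (q : Int × Int)
            (t : PySem.Set Int) => PySem.Set.add t q.1) d p)) from rfl]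
    exact PySem.Dict.nodup_keys_foldl_modify_key _ _ _ _ _ (by simp [PySem.Dict.keys_empty])
  -- the index list at m, and the final index
  obtain ⟨tl, htl, htlb⟩ := pv_filter_enum_struct sums m 0 hmmem
  simp only [zero_add] at htl htlb
  have hL : PySem.Dict.getD dcols m PySem.Set.empty = ((sums.idxOf m : Int)) :: tl := by
    rw [hgetD m, htl]
  have hidxB : PySem.List.index? sums m = some (sums.idxOf m) := by
    rw [PySem.List.index?_eq_idxOf?]
    refine List.idxOf?_eq_some_iff.mpr
      ⟨List.idxOf_lt_length_of_mem hmmem, List.getElem_idxOf _, ?_⟩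
    intro j hj
    have := List.not_of_lt_findIdx (p := (· == m)) (xs := sums) hj
    simpa using this
  rw [hvalues, hm]
  simp only [Option.getD_some]
  set ddcols : PySem.Dict Int (PySem.Set Int) :=
    PySem.Dict.mk (dcols.items.filter (fun p => 1 < PySem.Set.len p.2)) with hddcols
  by_cases hc : ddcols.contains m = true
  · rw [if_pos hc]
    -- m ∈ ddcols.keys, and every key of ddcols is a value of sums, hence ≥ m
    have hmk : m ∈ ddcols.keys := (PySem.Dict.contains_iff_mem_keys ddcols m).mp hc
    have hkb : ∀ k ∈ ddcols.keys, m ≤ k := by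
      intro k hk
      rw [hddcols, PySem.Dict.keys_mk, List.mem_map] at hk
      obtain ⟨p, hp, rfl⟩ := hk
      have hpd : p ∈ dcols.items := List.mem_of_mem_filter hp
      have : p.1 ∈ dcols.keys := by
        show p.1 ∈ dcols.items.map (fun q => q.1)
        exact List.mem_map.mpr ⟨p, hpd, rfl⟩
      exact hmmin p.1 (hkeys p.1 this)
    rw [pv_min?_eq_of_bound _ m hmk hkb]
    simp only [Option.getD_some]
    -- ddcols.getD m = dcols.getD m
    have hsome : ∃ S, ddcols.get? m = some S := by
      rw [PySem.Dict.contains_eq_isSome_get?] at hc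
      cases hg : ddcols.get? m with
      | none => rw [hg] at hc; simp at hc
      | some S => exact ⟨S, rfl⟩
    obtain ⟨S, hS⟩ := hsome
    have hmemItems : (m, S) ∈ dcols.items :=
      List.mem_of_mem_filter (by
        have := PySem.Dict.mem_items_of_get?_eq_some ddcols hS
        rwa [hddcols] at this)
    have hdg : PySem.Dict.getD dcols m PySem.Set.empty = S :=
      PySem.Dict.getD_of_mem_items dcols hmemItems hnodupkeys PySem.Set.empty
    rw [PySem.Dict.getD_of_get?_eq_some ddcols PySem.Set.empty hS, ← hdg, hL]
    rw [PySem.List.min?_id_cons, Option.getD_some, pv_foldl_min_eq tl _ htlb, hidxB]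
    rfl
  · rw [if_neg hc, hL, hidxB]
    rfl

-- ===== VERDICT (by name: the statement is the Claim_ definition above) =====
theorem colling_spec : Claim_equal_colling := by
  intro matrix _ hpre
  unfold Spec_colling
  exact colling_eq_alt matrix hpre
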